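-- pv_equiv track=rewrite | github.com/MrBrantCode/unitest_baseline | mut_generate/mist_train_taco/taco_9222/solution.py | minimum_conversions
-- ===== SOURCE A (Python) =====
-- def minimum_conversions(str1, str2):
--     def minoper(str1, str2):
--         l = len(str1)
--         if l == 1:
--             return abs(ord(str1[0]) - ord(str2[0]))
--         minnum = float('inf')
--         minnum = min(minnum, minoper(str1[1:], str2[1:]) + abs(ord(str1[0]) - ord(str2[0])))
--         for i in range(1, l):
--             str11 = list(str1)
--             str22 = list(str2)
--             str22[0], str22[i] = str22[i], str22[0]
--             minnum = min(minnum, 1 + minoper(str11[1:], str22[1:]) + abs(ord(str11[0]) - ord(str22[0])))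
--         return minnum
--
--     return minoper(list(str1), list(str2))
-- ===== SOURCE B (Python) =====
-- def minimum_conversions(str1, str2):
--     s1 = list(str1)
--     n = len(s1)
--     cache = {}
--
--     def rec(k, s2):
--         # s2 is the permuted remainder of str2; since len(s2) determines k
--         # within one top-level call, tuple(s2) alone is a complete memo key
--         if k == n - 1:
--             return abs(ord(s1[k]) - ord(s2[0]))
--         key = tuple(s2)
--         if key in cache:
--             return cache[key]
--         best = None
--         for i in range(n - k):
--             t = s2[1:]
--             if i:
--                 t[i - 1] = s2[0]
--             c = (1 if i else 0) + abs(ord(s1[k]) - ord(s2[i])) + rec(k + 1, t)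
--             if best is None or c < best:
--                 best = c
--         cache[key] = best
--         return best
--
--     return rec(0, list(str2))
-- ===== Notes on version B (the rewrite author's own statement) =====
-- stated objective: alternative
-- what changed: B restructures A's recursion on shrinking string copies into a memoized top-down DP: str1 stays fixed and is walked by an index k, each state is the permuted str2 remainder (a complete memo key, since its length determines k), results are cached in a dict, and the no-swap branch and the swap branches are unified into one loop over i in range(n-k).
import Mathlib
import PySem

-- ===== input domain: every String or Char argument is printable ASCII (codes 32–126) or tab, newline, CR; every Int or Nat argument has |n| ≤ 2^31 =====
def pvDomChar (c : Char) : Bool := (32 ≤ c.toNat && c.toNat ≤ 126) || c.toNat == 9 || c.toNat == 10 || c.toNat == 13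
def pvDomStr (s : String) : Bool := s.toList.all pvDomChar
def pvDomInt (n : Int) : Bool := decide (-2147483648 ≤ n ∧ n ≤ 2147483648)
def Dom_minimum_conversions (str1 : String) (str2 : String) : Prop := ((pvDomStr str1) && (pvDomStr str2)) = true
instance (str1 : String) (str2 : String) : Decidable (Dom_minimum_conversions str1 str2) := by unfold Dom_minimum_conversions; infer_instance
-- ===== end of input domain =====

-- B replaces A's recursion on shrinking string copies with a memoized top-down DP (fixed str1 walked by an index,
-- dict cache keyed on the permuted str2 remainder, one unified loop over all branches); return values proved equal
-- on inputs with 1 ≤ len(str1) ≤ len(str2).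

def pvOrd (c : Char) : Int := (c.toNat : Int)

-- ===== PORT A =====
-- literal port of minoper; the [] case (where Python recurses forever) is outside Pre_
def minoperA (s1 s2 : List Char) : Int :=
  match s1 with
  | [] => 0
  | [a] => |pvOrd a - pvOrd (s2.getD 0 ' ')|
  | a :: b :: t =>
    let minnum := minoperA (b :: t) (s2.drop 1) + |pvOrd a - pvOrd (s2.getD 0 ' ')|
    (PySem.List.pyRange 1 ((a :: b :: t).length : Int) 1).foldl (fun m i =>
      let s22 := (s2.set 0 (s2.getD i.toNat ' ')).set i.toNat (s2.getD 0 ' ')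
      min m (1 + minoperA (b :: t) (s22.drop 1) + |pvOrd a - pvOrd (s22.getD 0 ' ')|)) minnum
termination_by s1.length
decreasing_by all_goals simp

def minimum_conversions (str1 : String) (str2 : String) : Int :=
  minoperA str1.toList str2.toList

-- ===== PORT B =====
-- memoized DP walker: k indexes the fixed s1, s2 is the permuted str2 remainder (= the memo key),
-- one fold over i in range(n-k) unifies the keep-front (i=0) and swap (i>0) branches
def recB (s1 : List Char) (n : Nat) (k : Nat) (s2 : List Char)
    (cache : PySem.Dict (List Char) Int) : Int × PySem.Dict (List Char) Int :=
  match s2 with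
  | [] => (0, cache)   -- unreachable under Pre_ (Python raises IndexError on s2[0])
  | h :: tl =>
    if k = n - 1 then (|pvOrd (s1.getD k ' ') - pvOrd h|, cache)
    else
      match cache.get? (h :: tl) with
      | some v => (v, cache)
      | none =>
        let r := (PySem.List.pyRange 0 ((n - k : Nat) : Int) 1).foldl
          (fun acc i =>
            let t := if i = 0 then tl else tl.set (i.toNat - 1) h
            let ri := recB s1 n (k + 1) t acc.2
            let c := (if i = 0 then (0 : Int) else 1) +
              |pvOrd (s1.getD k ' ') - pvOrd ((h :: tl).getD i.toNat ' ')| + ri.1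
            ((match acc.1 with | none => some c | some m => some (min m c)), ri.2))
          ((none : Option Int), cache)
        match r.1 with
        | some best => (best, r.2.insert (h :: tl) best)
        | none => (0, r.2)   -- unreachable under Pre_ (Python's min over an empty generator raises)
termination_by s2.length
decreasing_by all_goals (split <;> simp)

def minimum_conversions_alt (str1 : String) (str2 : String) : Int :=
  (recB str1.toList str1.toList.length 0 str2.toList PySem.Dict.empty).1

-- ===== PRECONDITION & SPEC =====
-- Pre_ excludes inputs where Python A raises: empty str1 (unbounded recursion,
-- RecursionError) and str2 shorter than str1 (IndexError on str2[0]/str2[i]).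
def Pre_minimum_conversions (str1 : String) (str2 : String) : Prop :=
  1 ≤ str1.toList.length ∧ str1.toList.length ≤ str2.toList.length
instance (str1 : String) (str2 : String) : Decidable (Pre_minimum_conversions str1 str2) := by
  unfold Pre_minimum_conversions; infer_instance

def pvWitness_minimum_conversions : String × String := ("ab", "ba")

def Spec_minimum_conversions (str1 : String) (str2 : String) (out : Int) : Prop := out = minimum_conversions_alt str1 str2
instance (str1 : String) (str2 : String) (out : Int) : Decidable (Spec_minimum_conversions str1 str2 out) := by unfold Spec_minimum_conversions; infer_instance

-- ===== CLAIM (what is proved, stated in full; the proofs are below) =====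
def Claim_equal_minimum_conversions : Prop := ∀ (str1 : String) (str2 : String), Dom_minimum_conversions str1 str2 → Pre_minimum_conversions str1 str2 → Spec_minimum_conversions str1 str2 (minimum_conversions str1 str2)

-- ===== LEMMAS AND PROOFS =====

-- cache invariant: every stored value is the A-value of its key paired with the
-- str1 suffix determined (within one top-level call) by the key's length
def pvInv (s1f : List Char) (m : Nat) (c : PySem.Dict (List Char) Int) : Prop :=
  ∀ k v, c.get? k = some v → v = minoperA (s1f.drop (m - k.length)) k

lemma minoperA_one (a : Char) (s2 : List Char) :
    minoperA [a] s2 = |pvOrd a - pvOrd (s2.getD 0 ' ')| := by rw [minoperA]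

lemma minoperA_cons (a b : Char) (t s2 : List Char) :
    minoperA (a :: b :: t) s2 =
      (PySem.List.pyRange 1 ((a :: b :: t).length : Int) 1).foldl (fun m i =>
        let s22 := (s2.set 0 (s2.getD i.toNat ' ')).set i.toNat (s2.getD 0 ' ')
        min m (1 + minoperA (b :: t) (s22.drop 1) + |pvOrd a - pvOrd (s22.getD 0 ' ')|))
        (minoperA (b :: t) (s2.drop 1) + |pvOrd a - pvOrd (s2.getD 0 ' ')|) := by
  rw [minoperA]

-- the A-side swap, restated on the tail: dropping the swapped front leaves tl with s2[0] written at i-1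
lemma swap_drop (h : Char) (tl : List Char) (j : Nat) (hj : 1 ≤ j) :
    (((h :: tl).set 0 ((h :: tl).getD j ' ')).set j ((h :: tl).getD 0 ' ')).drop 1
      = tl.set (j - 1) h := by
  obtain ⟨j', rfl⟩ : ∃ j', j = j' + 1 := ⟨j - 1, by omega⟩
  simp [List.set]

lemma swap_head (h : Char) (tl : List Char) (j : Nat) (hj : 1 ≤ j) :
    (((h :: tl).set 0 ((h :: tl).getD j ' ')).set j ((h :: tl).getD 0 ' ')).getD 0 ' '
      = (h :: tl).getD j ' ' := by
  obtain ⟨j', rfl⟩ : ∃ j', j = j' + 1 := ⟨j - 1, by omega⟩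
  simp [List.set]

-- a list one shorter than a singleton-suffix: drop (len-1) is the last element
lemma drop_pred_singleton (l : List Char) (k : Nat) (hk : k + 1 = l.length) :
    l.drop k = [l.getD k ' '] := by
  have hklt : k < l.length := by omega
  rw [List.drop_eq_getElem_cons hklt, List.getD_eq_getElem l ' ' hklt]
  have : l.drop (k + 1) = [] := List.drop_eq_nil_of_le (by omega)
  rw [this]

lemma recB_spec (s1f : List Char) (m : Nat) (hnm : s1f.length ≤ m) :
    ∀ (L : Nat) (s2 : List Char) (k : Nat) (cache : PySem.Dict (List Char) Int),
      s2.length = L → pvInv s1f m cache → k + s2.length = m → k + 1 ≤ s1f.length →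
      (recB s1f s1f.length k s2 cache).1 = minoperA (s1f.drop k) s2 ∧
      pvInv s1f m (recB s1f s1f.length k s2 cache).2 := by
  intro L
  induction L with
  | zero =>
    intro s2 k cache hL _ hk hk1
    exfalso
    have : s2 = [] := List.eq_nil_of_length_eq_zero hL
    subst this; simp at hk; omega
  | succ L ih =>
    intro s2 k cache hL hI hk hk1
    obtain ⟨h, tl, rfl⟩ : ∃ h tl, s2 = h :: tl := by
      cases s2 with
      | nil => simp at hL
      | cons h tl => exact ⟨h, tl, rfl⟩
    have hn : 1 ≤ s1f.length := by omega
    by_cases hbase : k = s1f.length - 1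
    · -- base case: last character of str1
      have hkl : k + 1 = s1f.length := by omega
      rw [recB, if_pos hbase, drop_pred_singleton s1f k hkl, minoperA_one]
      exact ⟨rfl, hI⟩
    · have hklt : k + 1 < s1f.length := by omega
      -- shape of A's suffix: a :: b :: t
      have hd1 : s1f.drop k = s1f[k] :: s1f.drop (k + 1) :=
        List.drop_eq_getElem_cons (by omega)
      have hd2 : s1f.drop (k + 1) = s1f[k+1] :: s1f.drop (k + 2) :=
        List.drop_eq_getElem_cons (by omega)
      set a := s1f[k] with ha
      set b := s1f[k+1] with hb
      set t := s1f.drop (k + 2) with ht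
      have hdrop : s1f.drop k = a :: b :: t := by rw [hd1, hd2]
      have hgetDa : s1f.getD k ' ' = a := List.getD_eq_getElem s1f ' ' (by omega)
      have hlen2 : ((a :: b :: t).length : Int) = ((s1f.length - k : Nat) : Int) := by
        have : (a :: b :: t).length = s1f.length - k := by
          rw [← hdrop, List.length_drop]
        rw [this]
      -- value freshly computed equals A's: invariant preserved by the insert
      have hins : ∀ (c : PySem.Dict (List Char) Int), pvInv s1f m c →
          ∀ w, w = minoperA (s1f.drop k) (h :: tl) →
          pvInv s1f m (c.insert (h :: tl) w) := by
        intro c hc w hw key u hkey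
        rw [PySem.Dict.get?_insert] at hkey
        by_cases hks : key = h :: tl
        · simp [hks] at hkey
          rw [← hkey, hw, hks]
          have : m - (h :: tl).length = k := by simp [hL] at hk ⊢; omega
          rw [this]
        · simp [hks] at hkey
          exact hc key u hkey
      rw [recB, if_neg hbase]
      cases hv : cache.get? (h :: tl) with
      | some v =>
        have : m - (h :: tl).length = k := by simp [hL] at hk ⊢; omega
        exact ⟨by rw [hI _ v hv, this], hI⟩
      | none =>
        have hLlen : tl.length = L := by simpa using hL
        -- recursive calls in the fold are all at level L
        have ihcall : ∀ (u : List Char) (c : PySem.Dict (List Char) Int),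
            u.length = L → pvInv s1f m c →
            (recB s1f s1f.length (k + 1) u c).1 = minoperA (b :: t) u ∧
            pvInv s1f m (recB s1f s1f.length (k + 1) u c).2 := by
          intro u c hu hc
          have := ih u (k + 1) c hu hc (by simp [hL] at hk; omega) (by omega)
          rwa [hd2] at this
        -- the fold over i = 1 .. n-k-1 tracks A's fold on the value component
        have hfold : ∀ (is : List Int), (∀ i ∈ is, 1 ≤ i) →
            ∀ (mval : Int) (c : PySem.Dict (List Char) Int), pvInv s1f m c →
            ((is.foldl (fun acc i =>
                let tt := if i = 0 then tl else tl.set (i.toNat - 1) h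
                let ri := recB s1f s1f.length (k + 1) tt acc.2
                let cc := (if i = 0 then (0 : Int) else 1) +
                  |pvOrd (s1f.getD k ' ') - pvOrd ((h :: tl).getD i.toNat ' ')| + ri.1
                ((match acc.1 with | none => some cc | some mm => some (min mm cc)), ri.2))
              (some mval, c)).1
              = some (is.foldl (fun mm i =>
                  let s22 := ((h :: tl).set 0 ((h :: tl).getD i.toNat ' ')).set i.toNat
                    ((h :: tl).getD 0 ' ')
                  min mm (1 + minoperA (b :: t) (s22.drop 1) +
                    |pvOrd a - pvOrd (s22.getD 0 ' ')|)) mval))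
            ∧ pvInv s1f m ((is.foldl (fun acc i =>
                let tt := if i = 0 then tl else tl.set (i.toNat - 1) h
                let ri := recB s1f s1f.length (k + 1) tt acc.2
                let cc := (if i = 0 then (0 : Int) else 1) +
                  |pvOrd (s1f.getD k ' ') - pvOrd ((h :: tl).getD i.toNat ' ')| + ri.1
                ((match acc.1 with | none => some cc | some mm => some (min mm cc)), ri.2))
              (some mval, c)).2) := by
          intro is
          induction is with
          | nil => intro _ mval c hc; exact ⟨rfl, hc⟩
          | cons i is' ihf =>
            intro hmem mval c hc
            have hi1 : 1 ≤ i := hmem i (List.mem_cons_self ..)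
            have hi0 : ¬ i = 0 := by omega
            have hjn : 1 ≤ i.toNat := by omega
            have hset : (tl.set (i.toNat - 1) h).length = L := by
              rw [List.length_set]; exact hLlen
            have hcall := ihcall (tl.set (i.toNat - 1) h) c hset hc
            simp only [List.foldl_cons, if_neg hi0]
            rw [hcall.1]
            have heq : (0 : Int) + 1 + |pvOrd (s1f.getD k ' ') - pvOrd ((h :: tl).getD i.toNat ' ')| +
                minoperA (b :: t) (tl.set (i.toNat - 1) h)
                = 1 + minoperA (b :: t)
                    ((((h :: tl).set 0 ((h :: tl).getD i.toNat ' ')).set i.toNat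
                      ((h :: tl).getD 0 ' ')).drop 1) +
                  |pvOrd a - pvOrd ((((h :: tl).set 0 ((h :: tl).getD i.toNat ' ')).set i.toNat
                      ((h :: tl).getD 0 ' ')).getD 0 ' ')| := by
              rw [swap_drop h tl i.toNat hjn, swap_head h tl i.toNat hjn, hgetDa]
              ring
            simp only [zero_add] at heq
            rw [heq]
            exact ihf (fun j hj => hmem j (List.mem_cons_of_mem _ hj)) _ _ hcall.2
        -- split off the i = 0 step of B's fold
        have hpos : (0 : Int) < ((s1f.length - k : Nat) : Int) := by
          have : 1 ≤ s1f.length - k := by omega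
          exact_mod_cast Nat.lt_of_lt_of_le Nat.zero_lt_one this
        rw [PySem.List.pyRange_one_cons hpos]
        simp only [List.foldl_cons, reduceIte, Int.toNat_zero, zero_add]
        have h0call := ihcall tl cache hLlen hI
        rw [h0call.1]
        have hstart : |pvOrd (s1f.getD k ' ') - pvOrd ((h :: tl).getD 0 ' ')| +
            minoperA (b :: t) tl
            = minoperA (b :: t) ((h :: tl).drop 1) + |pvOrd a - pvOrd ((h :: tl).getD 0 ' ')| := by
          rw [hgetDa]; simp; ring
        rw [hstart]
        have hmem1 : ∀ i ∈ PySem.List.pyRange 1 ((s1f.length - k : Nat) : Int) 1, 1 ≤ i := by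
          intro i hi
          exact (PySem.List.mem_pyRange_one.mp hi).1
        have hf := hfold (PySem.List.pyRange 1 ((s1f.length - k : Nat) : Int) 1) hmem1
          (minoperA (b :: t) ((h :: tl).drop 1) + |pvOrd a - pvOrd ((h :: tl).getD 0 ' ')|)
          _ h0call.2
        rw [hf.1]
        have hAval : minoperA (s1f.drop k) (h :: tl) =
            (PySem.List.pyRange 1 ((s1f.length - k : Nat) : Int) 1).foldl (fun mm i =>
              let s22 := ((h :: tl).set 0 ((h :: tl).getD i.toNat ' ')).set i.toNat
                ((h :: tl).getD 0 ' ')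
              min mm (1 + minoperA (b :: t) (s22.drop 1) + |pvOrd a - pvOrd (s22.getD 0 ' ')|))
              (minoperA (b :: t) ((h :: tl).drop 1) + |pvOrd a - pvOrd ((h :: tl).getD 0 ' ')|) := by
          rw [hdrop, minoperA_cons, hlen2]
        exact ⟨hAval.symm, hins _ hf.2 _ hAval.symm⟩

theorem minimum_conversions_spec : Claim_equal_minimum_conversions := by
  intro str1 str2 _ hpre
  unfold Spec_minimum_conversions minimum_conversions minimum_conversions_alt
  have := recB_spec str1.toList str2.toList.length hpre.2 str2.toList.length str2.toList 0
    PySem.Dict.empty rfl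
    (by intro k v hv; simp [PySem.Dict.get?_empty] at hv)
    (by simp) (by simpa using hpre.1)
  rw [this.1]
  simp
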